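-- pv_equiv track=rewrite | github.com/yoonjoonso/Job-Logger | scripts/generate-resume.py | format_skill_group_items
-- ===== SOURCE A (Python) =====
-- def format_skill_group_items(items):
--     primary = [f"{item['display']} (primary)" for item in items if item.get("emphasis") == "primary" and item.get("display")]
--     experience = [item["display"] for item in items if item.get("emphasis") == "experience" and item.get("display")]
--     plain = [item["display"] for item in items if item.get("emphasis") not in {"primary", "experience"} and item.get("display")]
--
--     rendered = []
--     rendered.extend(primary)
--     if experience:
--         rendered.append(f"experience with {', '.join(experience)}")
--     rendered.extend(plain)
--     return ", ".join(rendered)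
-- ===== SOURCE B (Python) =====
-- def format_skill_group_items(items):
--     # Single pass: classify each item once into one of three buckets.
--     primary, experience, plain = [], [], []
--     for item in items:
--         display = item.get("display")
--         if not display:
--             continue
--         emphasis = item.get("emphasis")
--         if emphasis == "primary":
--             primary.append(display + " (primary)")
--         elif emphasis == "experience":
--             experience.append(display)
--         else:
--             plain.append(display)
--     rendered = list(primary)
--     if experience:
--         rendered.append("experience with " + ", ".join(experience))
--     rendered.extend(plain)
--     return ", ".join(rendered)
-- ===== Notes on version B (the rewrite author's own statement) =====
-- stated objective: simpler
-- what changed: Three separate list-comprehension scans over items are replaced by one pass that classifies each item once into primary/experience/plain buckets, assembled identically afterwards.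
import Mathlib
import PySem

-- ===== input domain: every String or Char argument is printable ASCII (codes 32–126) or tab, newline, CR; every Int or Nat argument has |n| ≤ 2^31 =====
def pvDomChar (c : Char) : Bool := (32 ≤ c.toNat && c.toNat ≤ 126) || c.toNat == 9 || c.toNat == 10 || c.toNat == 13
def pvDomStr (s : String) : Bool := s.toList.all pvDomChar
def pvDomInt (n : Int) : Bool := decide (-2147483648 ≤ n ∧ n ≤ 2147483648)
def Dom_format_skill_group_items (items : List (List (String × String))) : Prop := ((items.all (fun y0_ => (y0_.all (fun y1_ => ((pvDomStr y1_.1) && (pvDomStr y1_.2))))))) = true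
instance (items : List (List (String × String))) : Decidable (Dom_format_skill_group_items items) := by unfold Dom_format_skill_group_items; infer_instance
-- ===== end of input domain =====

-- B replaces A's three comprehension scans by one pass that classifies each item once (objective: simpler single-pass partition).

-- ===== PORT A =====
-- item.get(k) on an association list: first match (the convention for dict → List (K × V)).
def pvGet? (item : List (String × String)) (k : String) : Option String :=
  (item.find? (fun p => p.1 == k)).map (·.2)
-- a truthy item.get("display") guarantees the key is present, so item["display"]
-- is ported exactly by (pvGet? item "display").getD "".
def pvDisp (item : List (String × String)) : String :=
  (pvGet? item "display").getD ""

def format_skill_group_items (items : List (List (String × String))) : String :=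
  let primary := (items.filter (fun item =>
      (pvGet? item "emphasis" == some "primary") && (pvDisp item != ""))).map
      (fun item => pvDisp item ++ " (primary)")
  let experience := (items.filter (fun item =>
      (pvGet? item "emphasis" == some "experience") && (pvDisp item != ""))).map pvDisp
  let plain := (items.filter (fun item =>
      (pvGet? item "emphasis" != some "primary") &&
      (pvGet? item "emphasis" != some "experience") && (pvDisp item != ""))).map pvDisp
  let rendered := primary ++
    (if experience ≠ [] then ["experience with " ++ PySem.Str.join ", " experience] else []) ++ plain
  PySem.Str.join ", " rendered

-- ===== PORT B =====
def pvStep (acc : List String × List String × List String) (item : List (String × String)) :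
    List String × List String × List String :=
  let display := (pvGet? item "display").getD ""
  if display == "" then acc
  else
    let emphasis := pvGet? item "emphasis"
    if emphasis == some "primary" then (acc.1 ++ [display ++ " (primary)"], acc.2.1, acc.2.2)
    else if emphasis == some "experience" then (acc.1, acc.2.1 ++ [display], acc.2.2)
    else (acc.1, acc.2.1, acc.2.2 ++ [display])

def format_skill_group_items_alt (items : List (List (String × String))) : String :=
  let buckets := items.foldl pvStep ([], [], [])
  let rendered := buckets.1 ++
    (if buckets.2.1 ≠ [] then ["experience with " ++ PySem.Str.join ", " buckets.2.1] else []) ++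
    buckets.2.2
  PySem.Str.join ", " rendered

-- ===== PRECONDITION & SPEC =====
def Spec_format_skill_group_items (items : List (List (String × String))) (out : String) : Prop := out = format_skill_group_items_alt items
instance (items : List (List (String × String))) (out : String) : Decidable (Spec_format_skill_group_items items out) := by unfold Spec_format_skill_group_items; infer_instance

-- ===== CLAIM (what is proved, stated in full; the proofs are below) =====
def Claim_equal_format_skill_group_items : Prop := ∀ (items : List (List (String × String))), Dom_format_skill_group_items items → Spec_format_skill_group_items items (format_skill_group_items items)

-- ===== LEMMAS AND PROOFS =====
lemma pvStep_foldl (l : List (List (String × String))) (p e q : List String) :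
    l.foldl pvStep (p, e, q) =
      (p ++ (l.filter (fun item =>
          (pvGet? item "emphasis" == some "primary") && (pvDisp item != ""))).map
          (fun item => pvDisp item ++ " (primary)"),
       e ++ (l.filter (fun item =>
          (pvGet? item "emphasis" == some "experience") && (pvDisp item != ""))).map pvDisp,
       q ++ (l.filter (fun item =>
          (pvGet? item "emphasis" != some "primary") &&
          (pvGet? item "emphasis" != some "experience") && (pvDisp item != ""))).map pvDisp) := by
  induction l generalizing p e q with
  | nil => simp
  | cons x xs ih =>
    simp only [List.foldl_cons, List.filter_cons, ih]
    by_cases hd : (pvGet? x "display").getD "" = ""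
    · simp [pvStep, pvDisp, hd]
    · by_cases hp : pvGet? x "emphasis" = some "primary"
      · simp [pvStep, pvDisp, hd, hp]
      · by_cases he : pvGet? x "emphasis" = some "experience"
        · simp [pvStep, pvDisp, hd, hp, he]
        · simp [pvStep, pvDisp, hd, hp, he]

-- ===== VERDICT (by name: the statement is the Claim_ definition above) =====
theorem format_skill_group_items_spec : Claim_equal_format_skill_group_items := by
  intro items _
  show _ = _
  unfold format_skill_group_items format_skill_group_items_alt
  rw [pvStep_foldl]
  simp
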